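-- pv_equiv track=rewrite | github.com/JoshuaSeth/SAT_solver | SAT_helper_functions.py | get_clause_dictionary
-- ===== SOURCE A (Python) =====
-- def get_clause_dictionary(cnf_formula):
--     """Returns a dictionary where the variables are the keys and the
--     clause indices containing these keys the values.
--     This way all clauses containing a certain variable can be quickly found"""
--     dictionary = {}
--     clause_index = -1
--     # Loop through all clauses in CNF
--     for clause in cnf_formula:
--         clause_index += 1
--         # Loop through all terms in clause
--         for variable in clause:
--             # Remove - if present
--             variable_name = abs(variable)
--             # If term/variable is in dict add this clause index to it's references,
--             if variable_name in dictionary: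
--                 dictionary[variable_name].append(clause_index)
--             # Else add it to the dict referring to this clause
--             else:
--                 dictionary[variable_name] = [clause_index]
--     return dictionary
-- ===== SOURCE B (Python) =====
-- def get_clause_dictionary(cnf_formula):
--     """Flat-table reformulation: build one list of (variable, clause_index)
--     pairs, dedup the variables in first-occurrence order, then gather each
--     variable's indices with a filter over the table."""
--     pairs = [(abs(v), i) for i, clause in enumerate(cnf_formula) for v in clause]
--     keys = dict.fromkeys(k for k, _ in pairs)
--     return {k: [i for pk, i in pairs if pk == k] for k in keys}
-- ===== Notes on version B (the rewrite author's own statement) =====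
-- stated objective: alternative
-- what changed: Replaces A's incremental dict-update double loop (counter + append-or-insert per literal) with a flat table of (variable, clause_index) pairs built once, an ordered dedup of the variable column, and a per-variable filter over the table.
import Mathlib
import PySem

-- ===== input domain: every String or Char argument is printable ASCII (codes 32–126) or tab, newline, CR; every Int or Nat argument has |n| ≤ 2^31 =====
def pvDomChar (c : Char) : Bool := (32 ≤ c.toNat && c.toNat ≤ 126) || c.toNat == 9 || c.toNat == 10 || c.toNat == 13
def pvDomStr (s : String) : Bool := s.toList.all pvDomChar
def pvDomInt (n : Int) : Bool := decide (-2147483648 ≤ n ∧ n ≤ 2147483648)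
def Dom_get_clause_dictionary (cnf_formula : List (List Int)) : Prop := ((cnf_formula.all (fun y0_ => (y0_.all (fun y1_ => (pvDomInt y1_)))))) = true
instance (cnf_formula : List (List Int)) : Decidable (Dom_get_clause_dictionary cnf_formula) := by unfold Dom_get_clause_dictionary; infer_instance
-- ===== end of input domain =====

-- B rebuilds the dictionary from a flat (variable, clause_index) table instead of A's
-- incremental in-loop dict updates; alternative decomposition, same results.

-- ===== PORT A =====
-- inner 'for variable in clause' body: append index if key present, else insert it
def pvStepA (ci : Int) (d : PySem.Dict Int (List Int)) (v : Int) : PySem.Dict Int (List Int) :=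
  let name := |v|
  match d.get? name with
  | some refs => d.insert name (refs ++ [ci])
  | none => d.insert name [ci]

def get_clause_dictionary (cnf_formula : List (List Int)) : List (Int × List Int) :=
  (cnf_formula.foldl
    (fun (st : PySem.Dict Int (List Int) × Int) clause =>
      let ci := st.2 + 1
      (clause.foldl (pvStepA ci) st.1, ci))
    (PySem.Dict.empty, -1)).1.items

-- ===== PORT B =====
def get_clause_dictionary_alt (cnf_formula : List (List Int)) : List (Int × List Int) :=
  let pairs := (PySem.List.enumerate cnf_formula).flatMap (fun p => p.2.map (fun v => (|v|, p.1)))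
  let keys := PySem.List.dedup (pairs.map (·.1))
  keys.map (fun k => (k, (pairs.filter (fun q => q.1 == k)).map (·.2)))

-- ===== PRECONDITION & SPEC =====
def Spec_get_clause_dictionary (cnf_formula : List (List Int)) (out : List (Int × List Int)) : Prop := out = get_clause_dictionary_alt cnf_formula
instance (cnf_formula : List (List Int)) (out : List (Int × List Int)) : Decidable (Spec_get_clause_dictionary cnf_formula out) := by unfold Spec_get_clause_dictionary; infer_instance

-- ===== CLAIM (what is proved, stated in full; the proofs are below) =====
def Claim_equal_get_clause_dictionary : Prop := ∀ (cnf_formula : List (List Int)), Dom_get_clause_dictionary cnf_formula → Spec_get_clause_dictionary cnf_formula (get_clause_dictionary cnf_formula)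

-- ===== LEMMAS AND PROOFS =====

-- A's append-or-insert branch is dict.modify with default []
theorem pvStepA_eq_modify (ci : Int) (d : PySem.Dict Int (List Int)) (v : Int) :
    pvStepA ci d v = d.modify |v| [] (· ++ [ci]) := by
  unfold pvStepA
  cases h : d.get? |v| with
  | none =>
      simp [PySem.Dict.modify, PySem.Dict.getD_eq_get?_getD, h]
  | some refs =>
      simp [PySem.Dict.modify, PySem.Dict.getD_eq_get?_getD, h]

-- A's outer loop with its hand-kept counter is a fold over enumerate
theorem pvFoldA_enum (cnf : List (List Int)) (d : PySem.Dict Int (List Int)) (c : Int) :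
    (cnf.foldl (fun (st : PySem.Dict Int (List Int) × Int) clause =>
        let ci := st.2 + 1
        (clause.foldl (pvStepA ci) st.1, ci)) (d, c))
      = ((PySem.List.enumerate cnf (c+1)).foldl
          (fun d p => p.2.foldl (pvStepA p.1) d) d, c + cnf.length) := by
  induction cnf generalizing d c with
  | nil => simp [PySem.List.enumerate_nil]
  | cons cl rest ih =>
      simp only [List.foldl_cons, PySem.List.enumerate_cons, ih]
      refine Prod.ext rfl ?_
      simp [List.length_cons]
      ring

-- the nested fold is one fold over the flattened pair table
theorem pvFold_flat (cnf : List (List Int)) (s : Int) (d : PySem.Dict Int (List Int)) :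
    (PySem.List.enumerate cnf s).foldl (fun d p => p.2.foldl (pvStepA p.1) d) d
      = ((PySem.List.enumerate cnf s).flatMap (fun p => p.2.map (fun v => (|v|, p.1)))).foldl
          (fun d q => d.modify q.1 [] (· ++ [q.2])) d := by
  generalize PySem.List.enumerate cnf s = L
  induction L generalizing d with
  | nil => simp
  | cons p rest ih =>
      simp only [List.foldl_cons, List.flatMap_cons, List.foldl_append, List.foldl_map, ih]
      congr 1
      have hstep : pvStepA p.1 = fun d v => d.modify |v| [] (· ++ [p.1]) := by
        funext d v; exact pvStepA_eq_modify _ _ _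
      rw [hstep]

-- ===== VERDICT (by name: the statement is the Claim_ definition above) =====
theorem get_clause_dictionary_spec : Claim_equal_get_clause_dictionary := by
  intro cnf _
  show get_clause_dictionary cnf = get_clause_dictionary_alt cnf
  set L := (PySem.List.enumerate cnf).flatMap (fun p => p.2.map (fun v => (|v|, p.1))) with hL
  have hB : get_clause_dictionary_alt cnf
      = (PySem.Set.ofList (L.map (·.1))).map
          (fun k => (k, (L.filter (fun q => q.1 == k)).map (·.2))) := by
    rw [hL]
    show (PySem.List.dedup _).map _ = _
    rw [PySem.List.dedup_eq_ofList]
  rw [hB]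
  unfold get_clause_dictionary
  rw [pvFoldA_enum, pvFold_flat]
  norm_num
  rw [← hL]
  have hnd : ((L.foldl (fun d q => d.modify q.1 [] (· ++ [q.2])) PySem.Dict.empty).keys).Nodup := by
    apply PySem.Dict.nodup_keys_foldl_modify_key L (fun q => q.1) [] (fun _ q => (· ++ [q.2]))
    simp
  rw [PySem.Dict.items_eq_map_keys _ hnd []]
  rw [PySem.Dict.keys_foldl_modify_key]
  simp only [PySem.Dict.keys_empty]
  apply List.map_congr_left
  intro k hk
  rw [PySem.Dict.getD_foldl_modify_append]
  simp [PySem.Dict.getD_eq_get?_getD, PySem.Dict.get?_empty]
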